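-- pv_equiv track=rewrite | github.com/Rart3x/42-rubik | Utils.py | check_splitted_args
-- ===== SOURCE A (Python) =====
-- def check_splitted_args(args):
--     """CheckSplit function"""
--
--     letters = {
--         'F', 'R', 'U', 'B', 'L', 'D'
--     } | {
--         'f', 'r', 'u', 'b', 'l', 'd'
--     }
--     numbers = {'2'}
--
--     for arg in args:
--         prev_char = None
--         for i, char in enumerate(arg):
--             if i == 0 and (char in numbers or char == "'"):
--                 return False
--             if (
--                 i != 0
--                 and (char in numbers or char == "'")
--                 and arg[i - 1] not in letters
--             ):
--                 return False
--             if prev_char in letters and char in letters: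
--                 return False
--             prev_char = char
--
--     return True
-- ===== SOURCE B (Python) =====
-- def check_splitted_args(args):
--     """CheckSplit function - table-driven DFA over char classes LET/NUM/OTH.
--
--     States: 0 = start / previous char not a letter, 1 = previous char a letter,
--     None = reject.  Accept iff every string ends in a live state.
--     """
--     LET, NUM, OTH = 0, 1, 2
--     TRANS = {
--         (0, LET): 1, (0, NUM): None, (0, OTH): 0,
--         (1, LET): None, (1, NUM): 0, (1, OTH): 0,
--     }
--
--     def cls(c):
--         if c in "FRUBLDfrubld":
--             return LET
--         if c in "2'":
--             return NUM
--         return OTH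
--
--     for arg in args:
--         state = 0
--         for ch in arg:
--             state = TRANS[(state, cls(ch))]
--             if state is None:
--                 return False
--     return True
-- ===== Notes on version B (the rewrite author's own statement) =====
-- stated objective: alternative
-- what changed: Replaces A's indexed lookback loop with three ad-hoc early-return rules (enumerate, prev_char, arg[i-1]) by a classic table-driven finite automaton: chars are classified into LET/NUM/OTH and a precomputed 2-state transition table drives the scan, rejecting on the dead state.
import Mathlib
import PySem

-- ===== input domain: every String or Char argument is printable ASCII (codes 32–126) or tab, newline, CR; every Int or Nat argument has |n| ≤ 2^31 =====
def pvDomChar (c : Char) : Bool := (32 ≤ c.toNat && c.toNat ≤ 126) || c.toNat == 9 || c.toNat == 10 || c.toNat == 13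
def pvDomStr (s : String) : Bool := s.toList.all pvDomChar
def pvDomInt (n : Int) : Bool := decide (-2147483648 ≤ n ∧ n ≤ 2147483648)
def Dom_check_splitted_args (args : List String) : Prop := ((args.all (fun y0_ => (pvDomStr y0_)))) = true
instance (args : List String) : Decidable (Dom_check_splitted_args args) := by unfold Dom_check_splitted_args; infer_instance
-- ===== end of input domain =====

-- B replaces A's indexed lookback loop (enumerate, prev_char, arg[i-1], three
-- early-return rules) by a table-driven 2-state finite automaton (alternative; same cost).

-- ===== PORT A =====
def pvIsLetter (c : Char) : Bool :=
  ['F','R','U','B','L','D','f','r','u','b','l','d'].contains c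

def pvIsNum (c : Char) : Bool := c == '2' || c == '\''

-- 'prev_char in letters' where prev_char may be None
def pvPrevInLetters : Option Char → Bool
  | some c => pvIsLetter c
  | none => false

-- the inner 'for i, char in enumerate(arg)' loop, with early return = false
def pvLoopA (arg : List Char) : List (Int × Char) → Option Char → Bool
  | [], _ => true
  | (i, c) :: rest, prev =>
    if i == 0 && pvIsNum c then false
    else if i != 0 && pvIsNum c &&
        !(match PySem.List.pyGet? arg (i - 1) with
          | some p => pvIsLetter p
          | none => false) then false
    else if pvPrevInLetters prev && pvIsLetter c then false
    else pvLoopA arg rest (some c)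

def pvInnerA (s : List Char) : Bool := pvLoopA s (PySem.List.enumerate s 0) none

def pvOuterA : List String → Bool
  | [] => true
  | a :: rest => if pvInnerA a.toList then pvOuterA rest else false

def check_splitted_args (args : List String) : Bool := pvOuterA args

-- ===== PORT B =====
-- char classes: 0 = LET, 1 = NUM, 2 = OTH  (Source B's cls)
def pvCls (c : Char) : Nat :=
  if "FRUBLDfrubld".toList.contains c then 0
  else if "2'".toList.contains c then 1
  else 2

-- Source B's TRANS table: live states 0 (prev not letter) and 1 (prev letter); none = reject
def pvTrans : Nat × Nat → Option Nat
  | (0, 0) => some 1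
  | (0, 1) => none
  | (0, 2) => some 0
  | (1, 0) => none
  | (1, 1) => some 0
  | (1, 2) => some 0
  | _ => none

-- the inner 'for ch in arg' loop of Source B
def pvRunB (st : Nat) : List Char → Bool
  | [] => true
  | c :: cs =>
    match pvTrans (st, pvCls c) with
    | none => false
    | some st' => pvRunB st' cs

-- the outer 'for arg in args' loop of Source B
def pvOuterB : List String → Bool
  | [] => true
  | a :: rest => if pvRunB 0 a.toList then pvOuterB rest else false

def check_splitted_args_alt (args : List String) : Bool := pvOuterB args

-- ===== PRECONDITION & SPEC =====
def Spec_check_splitted_args (args : List String) (out : Bool) : Prop := out = check_splitted_args_alt args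
instance (args : List String) (out : Bool) : Decidable (Spec_check_splitted_args args out) := by unfold Spec_check_splitted_args; infer_instance

-- ===== CLAIM (what is proved, stated in full; the proofs are below) =====
def Claim_equal_check_splitted_args : Prop := ∀ (args : List String), Dom_check_splitted_args args → Spec_check_splitted_args args (check_splitted_args args)

-- ===== LEMMAS AND PROOFS =====

-- proof-only intermediate: adjacent-pair characterisation of the language
def pvPairOk (p c : Char) : Bool :=
  !(pvIsLetter p && pvIsLetter c) && !(pvIsNum c && !pvIsLetter p)

theorem pvCls_eq (c : Char) :
    pvCls c = (if pvIsLetter c then 0 else if pvIsNum c then 1 else 2) := by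
  unfold pvCls pvIsLetter pvIsNum
  rw [show "FRUBLDfrubld".toList = ['F','R','U','B','L','D','f','r','u','b','l','d'] from rfl,
      show "2'".toList = ['2','\''] from rfl]
  simp

theorem pvNum_not_letter (c : Char) (h : pvIsNum c = true) : pvIsLetter c = false := by
  rcases (by simpa [pvIsNum] using h : c = '2' ∨ c = '\'') with rfl | rfl <;> decide

theorem pvLetter_not_num (c : Char) (h : pvIsLetter c = true) : pvIsNum c = false := by
  cases hn : pvIsNum c
  · rfl
  · rw [pvNum_not_letter c hn] at h; exact absurd h (by simp)

-- A's inner loop on the tail equals the pairwise check (as in the lookback rules)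
theorem pvLoopA_eq (l : List Char) : ∀ (s : List Char) (k : Nat) (p : Char),
    s[k]? = some p → s.drop (k+1) = l →
    pvLoopA s (PySem.List.enumerate l ((k : Int) + 1)) (some p)
      = ((p :: l).zip l).all (fun pc => pvPairOk pc.1 pc.2) := by
  induction l with
  | nil => intro s k p _ _; simp [PySem.List.enumerate_nil, pvLoopA]
  | cons c cs ih =>
    intro s k p hk hd
    have hc : s[k+1]? = some c := by
      have h : (List.drop (k+1) s)[0]? = s[k+1]? := by simp
      rw [hd] at h; simpa using h.symm
    have hd2 : s.drop (k+2) = cs := by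
      have : List.drop 1 (s.drop (k+1)) = s.drop (k+2) := by
        rw [List.drop_drop]
      rw [hd] at this; simpa using this.symm
    rw [PySem.List.enumerate_cons]
    have hne : ((k : Int) + 1 == 0) = false := by
      simp; omega
    have hget : PySem.List.pyGet? s ((k : Int) + 1 - 1) = some p := by
      have : (k : Int) + 1 - 1 = (k : Int) := by omega
      rw [this, PySem.List.pyGet?_natCast, hk]
    show pvLoopA s (((k : Int) + 1, c) :: PySem.List.enumerate cs ((k : Int) + 1 + 1)) (some p) = _
    rw [pvLoopA]
    have h11 : (k : Int) + 1 + 1 = ((k+1 : Nat) : Int) + 1 := by push_cast; ring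
    rw [hne, hget, h11, ih s (k+1) c hc hd2]
    have hne' : ¬ ((k : Int) + 1 = 0) := by omega
    cases hL : pvIsLetter p <;> cases hN : pvIsNum c <;> cases hLc : pvIsLetter c <;>
      simp [pvPairOk, pvPrevInLetters, hL, hN, hLc, hne']

-- B's automaton, started in the state recording whether p is a letter,
-- accepts exactly the pairwise check along (p :: l)
theorem pvRunB_eq (l : List Char) : ∀ (p : Char),
    pvRunB (if pvIsLetter p then 1 else 0) l
      = ((p :: l).zip l).all (fun pc => pvPairOk pc.1 pc.2) := by
  induction l with
  | nil => intro p; cases pvIsLetter p <;> simp [pvRunB]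
  | cons c cs ih =>
    intro p
    have hb := ih c
    cases hLc : pvIsLetter c
    · rw [hLc] at hb; norm_num at hb
      cases hL : pvIsLetter p <;> cases hN : pvIsNum c <;>
        simp [pvRunB, pvCls_eq, pvTrans, pvPairOk, hL, hLc, hN, hb]
    · rw [hLc] at hb; norm_num at hb
      have hN : pvIsNum c = false := pvLetter_not_num c hLc
      cases hL : pvIsLetter p <;>
        simp [pvRunB, pvCls_eq, pvTrans, pvPairOk, hL, hLc, hN, hb]

theorem pvInner_eq (s : List Char) : pvInnerA s = pvRunB 0 s := by
  cases s with
  | nil => simp [pvInnerA, PySem.List.enumerate_nil, pvLoopA, pvRunB]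
  | cons c cs =>
    unfold pvInnerA
    rw [PySem.List.enumerate_cons, pvLoopA]
    have hrec := pvLoopA_eq cs (c :: cs) 0 c (by simp) (by simp)
    norm_num at hrec
    have hb := pvRunB_eq cs c
    cases hLc : pvIsLetter c
    · rw [hLc] at hb; norm_num at hb
      cases hN : pvIsNum c <;>
        simp [pvRunB, pvCls_eq, pvTrans, pvPrevInLetters, pvPairOk, hLc, hN, hrec, hb]
    · rw [hLc] at hb; norm_num at hb
      have hN : pvIsNum c = false := pvLetter_not_num c hLc
      simp [pvRunB, pvCls_eq, pvTrans, pvPrevInLetters, pvPairOk, hLc, hN, hrec, hb]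

theorem pvOuter_eq (args : List String) : pvOuterA args = pvOuterB args := by
  induction args with
  | nil => rfl
  | cons a rest ih => rw [pvOuterA, pvOuterB, pvInner_eq, ih]

-- ===== VERDICT (by name: the statement is the Claim_ definition above) =====
theorem check_splitted_args_spec : Claim_equal_check_splitted_args := by
  intro args _
  unfold Spec_check_splitted_args check_splitted_args check_splitted_args_alt
  exact pvOuter_eq args
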